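-- pv_equiv track=rewrite | github.com/pypi-data/pypi-mirror-391 | packages/platon-cli/platon_cli-1.2.0.tar.gz/platon_cli-1.2.0/platon/utils.py | diff_dict
-- ===== SOURCE A (Python) =====
-- from typing import Any, Dict, List, Callable
--
-- def diff_dict(old: Dict, new: Dict) -> str:
--     """Generate diff between two dictionaries"""
--     lines = []
--
--     all_keys = set(old.keys()) | set(new.keys())
--
--     for key in sorted(all_keys):
--         old_val = old.get(key)
--         new_val = new.get(key)
--
--         if key not in old:
--             lines.append(f"+ {key}={new_val}")
--         elif key not in new:
--             lines.append(f"- {key}={old_val}")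
--         elif old_val != new_val:
--             lines.append(f"- {key}={old_val}")
--             lines.append(f"+ {key}={new_val}")
--
--     return "\n".join(lines)
-- ===== SOURCE B (Python) =====
-- def diff_dict(old, new):
--     """Generate diff between two dictionaries"""
--     # classify keys by three filter passes, then sort the affected groups once
--     groups = [(k, [f"- {k}={v}"]) for k, v in old.items() if k not in new]
--     groups += [(k, [f"+ {k}={v}"]) for k, v in new.items() if k not in old]
--     groups += [(k, [f"- {k}={old[k]}", f"+ {k}={v}"])
--                for k, v in new.items() if k in old and old[k] != v]
--     lines = []
--     for _, group in sorted(groups, key=lambda kg: kg[0]):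
--         lines.extend(group)
--     return "\n".join(lines)
-- ===== Notes on version B (the rewrite author's own statement) =====
-- stated objective: alternative
-- what changed: Replaces A's single classifying loop over the sorted key union by three membership-filter passes (deleted, added, changed) that build key-tagged line groups, which are then sorted once by key and concatenated.
import Mathlib
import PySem

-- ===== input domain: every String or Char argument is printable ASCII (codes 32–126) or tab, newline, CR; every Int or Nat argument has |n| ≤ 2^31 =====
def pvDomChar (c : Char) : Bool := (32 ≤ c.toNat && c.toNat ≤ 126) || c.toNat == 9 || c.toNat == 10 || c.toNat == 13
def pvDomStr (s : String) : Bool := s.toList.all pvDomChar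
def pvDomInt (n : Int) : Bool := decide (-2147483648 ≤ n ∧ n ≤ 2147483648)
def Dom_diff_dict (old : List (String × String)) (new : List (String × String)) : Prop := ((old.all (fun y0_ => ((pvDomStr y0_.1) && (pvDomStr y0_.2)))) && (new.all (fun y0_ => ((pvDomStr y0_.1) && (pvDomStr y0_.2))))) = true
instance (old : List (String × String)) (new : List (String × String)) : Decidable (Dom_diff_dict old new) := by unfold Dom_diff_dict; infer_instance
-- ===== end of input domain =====

-- B replaces A's single classifying loop over the sorted key union by three
-- membership-filter passes building key-tagged line groups, sorted once by key (objective: alternative).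


-- ===== PORT A =====
-- f"{x}" for a value that may be None: prints "None" for None (unreachable in the guarded branches)
def pyShowOpt (o : Option String) : String :=
  match o with
  | none => "None"
  | some s => s

def diff_dict (old : List (String × String)) (new : List (String × String)) : String :=
  -- all_keys = set(old.keys()) | set(new.keys())
  let allKeys : PySem.Set String :=
    PySem.Set.union (PySem.Set.ofList (old.map Prod.fst)) (PySem.Set.ofList (new.map Prod.fst))
  -- for key in sorted(all_keys): … lines.append(…)
  let lines : List String :=
    (PySem.List.sorted allKeys (fun k => k)).foldl
      (fun lines key =>
        let oldVal := (PySem.Dict.mk old).get? key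
        let newVal := (PySem.Dict.mk new).get? key
        if !(PySem.Dict.mk old).contains key then
          lines ++ ["+ " ++ key ++ "=" ++ pyShowOpt newVal]
        else if !(PySem.Dict.mk new).contains key then
          lines ++ ["- " ++ key ++ "=" ++ pyShowOpt oldVal]
        else if oldVal ≠ newVal then
          lines ++ ["- " ++ key ++ "=" ++ pyShowOpt oldVal, "+ " ++ key ++ "=" ++ pyShowOpt newVal]
        else lines)
      []
  PySem.Str.join "\n" lines

-- ===== PORT B =====
def diff_dict_alt (old : List (String × String)) (new : List (String × String)) : String :=
  -- three comprehensions over .items() (the association list itself, keys unique under Pre_)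
  let groups : List (String × List String) :=
    (old.filter (fun p => !(PySem.Dict.mk new).contains p.1)).map
      (fun p => (p.1, ["- " ++ p.1 ++ "=" ++ p.2]))
    ++ (new.filter (fun p => !(PySem.Dict.mk old).contains p.1)).map
      (fun p => (p.1, ["+ " ++ p.1 ++ "=" ++ p.2]))
    -- 'old[k] != v' ported via get?: the guard 'k in old' makes get? a some, so != some v is exact
    ++ (new.filter (fun p => (PySem.Dict.mk old).contains p.1
          && ((PySem.Dict.mk old).get? p.1 != some p.2))).map
      (fun p => (p.1, ["- " ++ p.1 ++ "=" ++ pyShowOpt ((PySem.Dict.mk old).get? p.1),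
                       "+ " ++ p.1 ++ "=" ++ p.2]))
  -- for _, group in sorted(groups, key=λkg: kg[0]): lines.extend(group)
  let lines : List String :=
    (PySem.List.sorted groups (fun kg => kg.1)).foldl (fun lines kg => lines ++ kg.2) []
  PySem.Str.join "\n" lines

-- ===== PRECONDITION & SPEC =====
-- Pre_ excludes association lists with a duplicated key: those represent no Python dict (dict
-- construction collapses duplicates, so both Pythons agree there), and the list-level behaviour
-- of the ports on them is an artefact of the modelling.
def Pre_diff_dict (old : List (String × String)) (new : List (String × String)) : Prop :=
  (old.map Prod.fst).Nodup ∧ (new.map Prod.fst).Nodup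
instance (old : List (String × String)) (new : List (String × String)) : Decidable (Pre_diff_dict old new) := by unfold Pre_diff_dict; infer_instance

def pvWitness_diff_dict : (List (String × String)) × (List (String × String)) :=
  ([("a", "1"), ("b", "2")], [("b", "3"), ("c", "4")])

def Spec_diff_dict (old : List (String × String)) (new : List (String × String)) (out : String) : Prop := out = diff_dict_alt old new
instance (old : List (String × String)) (new : List (String × String)) (out : String) : Decidable (Spec_diff_dict old new out) := by unfold Spec_diff_dict; infer_instance

-- ===== CLAIM (what is proved, stated in full; the proofs are below) =====
def Claim_equal_diff_dict : Prop := ∀ (old : List (String × String)) (new : List (String × String)), Dom_diff_dict old new → Pre_diff_dict old new → Spec_diff_dict old new (diff_dict old new)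

-- ===== LEMMAS AND PROOFS =====

-- A's per-key line group (what one iteration of A's loop appends for a key)
def gA (old new : List (String × String)) (k : String) : List String :=
  if !(PySem.Dict.mk old).contains k then
    ["+ " ++ k ++ "=" ++ pyShowOpt ((PySem.Dict.mk new).get? k)]
  else if !(PySem.Dict.mk new).contains k then
    ["- " ++ k ++ "=" ++ pyShowOpt ((PySem.Dict.mk old).get? k)]
  else if (PySem.Dict.mk old).get? k ≠ (PySem.Dict.mk new).get? k then
    ["- " ++ k ++ "=" ++ pyShowOpt ((PySem.Dict.mk old).get? k),
     "+ " ++ k ++ "=" ++ pyShowOpt ((PySem.Dict.mk new).get? k)]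
  else []

-- the keys on which gA is nonempty
def affB (old new : List (String × String)) (k : String) : Bool :=
  !(PySem.Dict.mk old).contains k || !(PySem.Dict.mk new).contains k
    || ((PySem.Dict.mk old).get? k != (PySem.Dict.mk new).get? k)

theorem contains_mk_iff {ν : Type} (ps : List (String × ν)) (k : String) :
    (PySem.Dict.mk ps).contains k = true ↔ k ∈ ps.map Prod.fst := by
  rw [PySem.Dict.contains_mk, List.any_eq_true]
  constructor
  · rintro ⟨p, hp, he⟩
    exact List.mem_map.2 ⟨p, hp, by simpa using he⟩
  · rintro h
    obtain ⟨p, hp, he⟩ := List.mem_map.1 h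
    exact ⟨p, hp, by simp [he]⟩

theorem get?_mk_of_mem {ν : Type} (ps : List (String × ν)) (k : String) (v : ν)
    (hnd : (ps.map Prod.fst).Nodup) (hm : (k, v) ∈ ps) :
    (PySem.Dict.mk ps).get? k = some v := by
  induction ps with
  | nil => cases hm
  | cons p rest ih =>
    rw [show (p : String × ν) = (p.1, p.2) from rfl, PySem.Dict.get?_mk_cons]
    rcases List.mem_cons.1 hm with h | h
    · simp [← h]
    · have hk : k ∈ rest.map Prod.fst := List.mem_map.2 ⟨_, h, rfl⟩
      have hne : p.1 ≠ k := by
        intro he; exact (List.nodup_cons.1 (by simpa using hnd)).1 (he ▸ hk)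
      simp only [List.map_cons, List.nodup_cons] at hnd
      simp [hne, ih hnd.2 h]

theorem flatMap_filter_eq {α β : Type} (p : α → Bool) (g : α → List β) (l : List α)
    (h : ∀ x ∈ l, p x = false → g x = []) :
    (l.filter p).flatMap g = l.flatMap g := by
  induction l with
  | nil => rfl
  | cons x xs ih =>
    have ih' := ih (fun y hy => h y (List.mem_cons_of_mem _ hy))
    by_cases hx : p x = true
    · simp [hx, ih']
    · have : p x = false := by simpa using hx
      simp [this, ih', h x (List.mem_cons_self ..) this]

-- A unfolds to: join of the flatMap of gA over the sorted key union
theorem diff_dict_eq_flatMap (old new : List (String × String)) :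
    diff_dict old new =
      PySem.Str.join "\n"
        ((PySem.List.sorted
            (PySem.Set.union (PySem.Set.ofList (old.map Prod.fst))
              (PySem.Set.ofList (new.map Prod.fst))) (fun k => k)).flatMap (gA old new)) := by
  unfold diff_dict
  have hb : (fun (lines : List String) (key : String) =>
        let oldVal := (PySem.Dict.mk old).get? key
        let newVal := (PySem.Dict.mk new).get? key
        if !(PySem.Dict.mk old).contains key then
          lines ++ ["+ " ++ key ++ "=" ++ pyShowOpt newVal]
        else if !(PySem.Dict.mk new).contains key then
          lines ++ ["- " ++ key ++ "=" ++ pyShowOpt oldVal]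
        else if oldVal ≠ newVal then
          lines ++ ["- " ++ key ++ "=" ++ pyShowOpt oldVal, "+ " ++ key ++ "=" ++ pyShowOpt newVal]
        else lines)
      = fun lines key => lines ++ gA old new key := by
    funext l k
    simp only [gA]
    split_ifs <;> simp
  simp only [hb, PySem.List.foldl_append_eq_flatMap, List.nil_append]

-- key lists of B's three passes
def delKeys (old new : List (String × String)) : List String :=
  (old.map Prod.fst).filter (fun k => !(PySem.Dict.mk new).contains k)
def addKeys (old new : List (String × String)) : List String :=
  (new.map Prod.fst).filter (fun k => !(PySem.Dict.mk old).contains k)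
def chgKeys (old new : List (String × String)) : List String :=
  (new.map Prod.fst).filter (fun k => (PySem.Dict.mk old).contains k
    && ((PySem.Dict.mk old).get? k != (PySem.Dict.mk new).get? k))

theorem piece_del (old new : List (String × String)) (hndO : (old.map Prod.fst).Nodup) :
    (old.filter (fun p => !(PySem.Dict.mk new).contains p.1)).map
      (fun p => (p.1, ["- " ++ p.1 ++ "=" ++ p.2]))
    = (delKeys old new).map (fun k => (k, gA old new k)) := by
  unfold delKeys
  rw [List.filter_map, List.map_map]
  apply List.map_congr_left
  intro p hp
  have hpo : p ∈ old := (List.mem_filter.1 hp).1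
  have hq : (!(PySem.Dict.mk new).contains p.1) = true := (List.mem_filter.1 hp).2
  have hO : (PySem.Dict.mk old).contains p.1 = true :=
    (contains_mk_iff old p.1).2 (List.mem_map.2 ⟨p, hpo, rfl⟩)
  have hg : (PySem.Dict.mk old).get? p.1 = some p.2 :=
    get?_mk_of_mem old p.1 p.2 hndO (by simpa using hpo)
  simp only [PySem.Dict.contains_mk] at hO hq
  simp [gA, hO, hq, hg, pyShowOpt]

theorem piece_add (old new : List (String × String)) (hndN : (new.map Prod.fst).Nodup) :
    (new.filter (fun p => !(PySem.Dict.mk old).contains p.1)).map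
      (fun p => (p.1, ["+ " ++ p.1 ++ "=" ++ p.2]))
    = (addKeys old new).map (fun k => (k, gA old new k)) := by
  unfold addKeys
  rw [List.filter_map, List.map_map]
  apply List.map_congr_left
  intro p hp
  have hpn : p ∈ new := (List.mem_filter.1 hp).1
  have hq : (!(PySem.Dict.mk old).contains p.1) = true := (List.mem_filter.1 hp).2
  have hg : (PySem.Dict.mk new).get? p.1 = some p.2 :=
    get?_mk_of_mem new p.1 p.2 hndN (by simpa using hpn)
  simp only [PySem.Dict.contains_mk] at hq
  simp [gA, hg, pyShowOpt, hq]

theorem piece_chg (old new : List (String × String)) (hndN : (new.map Prod.fst).Nodup) :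
    (new.filter (fun p => (PySem.Dict.mk old).contains p.1
        && ((PySem.Dict.mk old).get? p.1 != some p.2))).map
      (fun p => (p.1, ["- " ++ p.1 ++ "=" ++ pyShowOpt ((PySem.Dict.mk old).get? p.1),
                       "+ " ++ p.1 ++ "=" ++ p.2]))
    = (chgKeys old new).map (fun k => (k, gA old new k)) := by
  unfold chgKeys
  have hfc : (new.filter (fun p => (PySem.Dict.mk old).contains p.1
        && ((PySem.Dict.mk old).get? p.1 != some p.2)))
      = (new.filter (fun p => (PySem.Dict.mk old).contains p.1
        && ((PySem.Dict.mk old).get? p.1 != (PySem.Dict.mk new).get? p.1))) := by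
    apply List.filter_congr
    intro p hp
    have hg : (PySem.Dict.mk new).get? p.1 = some p.2 :=
      get?_mk_of_mem new p.1 p.2 hndN (by simpa using hp)
    rw [hg]
  rw [hfc, List.filter_map, List.map_map]
  apply List.map_congr_left
  intro p hp
  have hpn : p ∈ new := (List.mem_filter.1 hp).1
  have hq := (List.mem_filter.1 hp).2
  rw [Bool.and_eq_true] at hq
  obtain ⟨hO, hne⟩ := hq
  have hN : (PySem.Dict.mk new).contains p.1 = true :=
    (contains_mk_iff new p.1).2 (List.mem_map.2 ⟨p, hpn, rfl⟩)
  have hg : (PySem.Dict.mk new).get? p.1 = some p.2 :=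
    get?_mk_of_mem new p.1 p.2 hndN (by simpa using hpn)
  have hne' : (PySem.Dict.mk old).get? p.1 ≠ (PySem.Dict.mk new).get? p.1 := by
    simpa using hne
  simp only [PySem.Dict.contains_mk] at hO hN
  simp [gA, hO, hN, hg ▸ hne', hg, pyShowOpt]

-- the sorted, affected part of the key union
def unionKeys (old new : List (String × String)) : PySem.Set String :=
  PySem.Set.union (PySem.Set.ofList (old.map Prod.fst)) (PySem.Set.ofList (new.map Prod.fst))

theorem affKeys_perm (old new : List (String × String)) (hndO : (old.map Prod.fst).Nodup)
    (hndN : (new.map Prod.fst).Nodup) :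
    ((PySem.List.sorted (unionKeys old new) (fun k => k)).filter (affB old new)).Perm
      (delKeys old new ++ addKeys old new ++ chgKeys old new) := by
  have hUnd : (unionKeys old new).Nodup :=
    PySem.Set.nodup_union _ _ (PySem.Set.nodup_ofList _)
  have hSnd : (PySem.List.sorted (unionKeys old new) (fun k => k)).Nodup :=
    (PySem.List.sorted_perm (unionKeys old new) (fun k => k) false).symm.nodup hUnd
  have hnd2 : (delKeys old new ++ addKeys old new ++ chgKeys old new).Nodup := by
    rw [List.append_assoc, List.nodup_append, List.nodup_append]
    refine ⟨hndO.filter _, ⟨hndN.filter _, hndN.filter _, ?_⟩, ?_⟩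
    · intro a ha b hb he
      subst he
      have h1 : (!(PySem.Dict.mk old).contains a) = true := (List.mem_filter.1 ha).2
      have h2 : (PySem.Dict.mk old).contains a = true := by
        have := (List.mem_filter.1 hb).2
        rw [Bool.and_eq_true] at this
        exact this.1
      simp [h2] at h1
    · intro a ha b hb he
      subst he
      have h1 : (!(PySem.Dict.mk new).contains a) = true := (List.mem_filter.1 ha).2
      have h2 : (PySem.Dict.mk new).contains a = true := by
        rcases List.mem_append.1 hb with h | h
        · exact (contains_mk_iff new a).2 (List.mem_filter.1 h).1
        · exact (contains_mk_iff new a).2 (List.mem_filter.1 h).1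
      simp [h2] at h1
  refine (List.perm_ext_iff_of_nodup (hSnd.filter _) hnd2).2 ?_
  intro k
  have hco := contains_mk_iff old k
  have hcn := contains_mk_iff new k
  simp only [List.mem_filter, List.mem_append, PySem.List.mem_sorted, unionKeys,
    PySem.Set.mem_union, PySem.Set.mem_ofList, delKeys, addKeys, chgKeys, affB,
    Bool.or_eq_true, Bool.and_eq_true, Bool.not_eq_true']
  by_cases hO : k ∈ List.map Prod.fst old <;> by_cases hN : k ∈ List.map Prod.fst new
  · have h1 : (PySem.Dict.mk old).contains k = true := hco.2 hO
    have h2 : (PySem.Dict.mk new).contains k = true := hcn.2 hN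
    simp [hO, hN, h1, h2]
  · have h1 : (PySem.Dict.mk old).contains k = true := hco.2 hO
    have h2 : (PySem.Dict.mk new).contains k = false :=
      Bool.eq_false_iff.2 (fun h => hN (hcn.1 h))
    simp [hO, hN, h1, h2]
  · have h1 : (PySem.Dict.mk old).contains k = false :=
      Bool.eq_false_iff.2 (fun h => hO (hco.1 h))
    simp [hO, hN, h1]
  · simp [hO, hN]

theorem sorted_groups_eq (old new : List (String × String)) (hndO : (old.map Prod.fst).Nodup)
    (hndN : (new.map Prod.fst).Nodup) :
    PySem.List.sorted
      ((old.filter (fun p => !(PySem.Dict.mk new).contains p.1)).map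
          (fun p => (p.1, ["- " ++ p.1 ++ "=" ++ p.2]))
        ++ (new.filter (fun p => !(PySem.Dict.mk old).contains p.1)).map
          (fun p => (p.1, ["+ " ++ p.1 ++ "=" ++ p.2]))
        ++ (new.filter (fun p => (PySem.Dict.mk old).contains p.1
              && ((PySem.Dict.mk old).get? p.1 != some p.2))).map
          (fun p => (p.1, ["- " ++ p.1 ++ "=" ++ pyShowOpt ((PySem.Dict.mk old).get? p.1),
                           "+ " ++ p.1 ++ "=" ++ p.2])))
      (fun kg => kg.1)
    = ((PySem.List.sorted (unionKeys old new) (fun k => k)).filter (affB old new)).map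
        (fun k => (k, gA old new k)) := by
  apply PySem.List.sorted_eq_of_perm_of_pairwise_lt
  · rw [piece_del old new hndO, piece_add old new hndN, piece_chg old new hndN,
      ← List.map_append, ← List.map_append]
    exact List.Perm.map _ (affKeys_perm old new hndO hndN)
  · rw [List.pairwise_map]
    have hUnd : (unionKeys old new).Nodup :=
      PySem.Set.nodup_union _ _ (PySem.Set.nodup_ofList _)
    have hSnd : (PySem.List.sorted (unionKeys old new) (fun k => k)).Nodup :=
      (PySem.List.sorted_perm (unionKeys old new) (fun k => k) false).symm.nodup hUnd
    have hle := PySem.List.sorted_pairwise (unionKeys old new) (fun k => k)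
    have hlt : (PySem.List.sorted (unionKeys old new) (fun k => k)).Pairwise (· < ·) :=
      (hle.and hSnd).imp (fun h => lt_of_le_of_ne h.1 h.2)
    exact hlt.filter _

theorem gA_eq_nil (old new : List (String × String)) (k : String)
    (h : affB old new k = false) : gA old new k = [] := by
  unfold affB at h
  simp only [Bool.or_eq_false_iff, Bool.not_eq_false', bne_eq_false_iff_eq] at h
  obtain ⟨⟨h1, h2⟩, h3⟩ := h
  simp only [PySem.Dict.contains_mk] at h1 h2
  simp [gA, h1, h2, h3]

theorem diff_dict_spec' (old new : List (String × String))
    (hPre : Pre_diff_dict old new) : diff_dict old new = diff_dict_alt old new := by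
  obtain ⟨hndO, hndN⟩ := hPre
  rw [diff_dict_eq_flatMap]
  simp only [diff_dict_alt]
  rw [sorted_groups_eq old new hndO hndN]
  simp only [PySem.List.foldl_append_eq_flatMap, List.nil_append, List.flatMap_map]
  rw [flatMap_filter_eq (affB old new) (fun k => gA old new k) _
    (fun k _ h => gA_eq_nil old new k h)]
  rfl

-- ===== VERDICT (by name: the statement is the Claim_ definition above) =====
theorem diff_dict_spec : Claim_equal_diff_dict := by
  intro old new _ hPre
  exact diff_dict_spec' old new hPre
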